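-- pv_equiv track=rewrite | github.com/BenoitMorel/phd_experiments | tools/synteny/assess_gene_tree.py | get_filtered_neighbors
-- ===== SOURCE A (Python) =====
-- def get_filtered_neighbors(neighbors):
--   labels = set()
--   dup_labels = set()
--   for n in neighbors:
--     if (n[1] in labels):
--       dup_labels.add(n[1])
--     labels.add(n[1])
--   res = set()
--   for n in neighbors:
--     if (not n[1] in dup_labels):
--       res.add(n)
--   return res
-- ===== SOURCE B (Python) =====
-- def get_filtered_neighbors(neighbors):
--   groups = {}
--   for n in neighbors:
--     groups.setdefault(n[1], []).append(n)
--   res = set()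
--   for group in groups.values():
--     if len(group) == 1:
--       res.add(group[0])
--   return res
-- ===== Notes on version B (the rewrite author's own statement) =====
-- stated objective: alternative
-- what changed: B builds a dict grouping neighbors by label in one pass and then iterates over the groups, emitting the single member of every size-1 group, instead of A's two full scans of neighbors with labels/dup_labels sets.
import Mathlib
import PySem

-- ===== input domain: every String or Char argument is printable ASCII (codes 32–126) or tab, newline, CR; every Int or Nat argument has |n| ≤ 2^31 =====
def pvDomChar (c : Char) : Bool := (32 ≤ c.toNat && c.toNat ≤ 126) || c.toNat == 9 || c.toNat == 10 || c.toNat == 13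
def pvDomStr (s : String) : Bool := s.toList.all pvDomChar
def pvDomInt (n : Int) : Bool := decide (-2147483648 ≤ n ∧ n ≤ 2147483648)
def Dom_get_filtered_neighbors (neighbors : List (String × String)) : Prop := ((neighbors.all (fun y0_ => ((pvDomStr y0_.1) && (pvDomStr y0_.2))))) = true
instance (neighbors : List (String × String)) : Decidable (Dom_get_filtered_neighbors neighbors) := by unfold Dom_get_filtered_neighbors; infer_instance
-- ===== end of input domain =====

-- B groups neighbors by label into a dict in ONE pass and emits the single member of each
-- size-1 group, instead of A's two full scans of `neighbors` with labels/dup_labels sets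
-- (objective: alternative; same return value, proved below).

-- ===== PORT A =====
def get_filtered_neighbors (neighbors : List (String × String)) : List (String × String) :=
  -- first loop: labels / dup_labels (state = (labels, dup_labels))
  let s :=
    neighbors.foldl
      (fun (s : PySem.Set String × PySem.Set String) n =>
        (PySem.Set.add s.1 n.2,
         if PySem.Set.contains s.1 n.2 then PySem.Set.add s.2 n.2 else s.2))
      (PySem.Set.empty, PySem.Set.empty)
  -- second loop: res
  neighbors.foldl
    (fun r n => if !(PySem.Set.contains s.2 n.2) then PySem.Set.add r n else r)
    PySem.Set.empty

-- ===== PORT B =====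
def get_filtered_neighbors_alt (neighbors : List (String × String)) : List (String × String) :=
  -- groups.setdefault(n[1], []).append(n)
  let groups : PySem.Dict String (List (String × String)) :=
    neighbors.foldl (fun d n => d.insert n.2 (d.getD n.2 [] ++ [n])) PySem.Dict.empty
  -- for group in groups.values(): if len(group) == 1: res.add(group[0])
  groups.values.foldl
    (fun r g => if g.length == 1 then PySem.Set.add r (g.getD 0 ("", "")) else r)
    PySem.Set.empty

-- ===== PRECONDITION & SPEC =====
def Spec_get_filtered_neighbors (neighbors : List (String × String)) (out : List (String × String)) : Prop := out = get_filtered_neighbors_alt neighbors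
instance (neighbors : List (String × String)) (out : List (String × String)) : Decidable (Spec_get_filtered_neighbors neighbors out) := by unfold Spec_get_filtered_neighbors; infer_instance

-- ===== CLAIM (what is proved, stated in full; the proofs are below) =====
def Claim_equal_get_filtered_neighbors : Prop := ∀ (neighbors : List (String × String)), Dom_get_filtered_neighbors neighbors → Spec_get_filtered_neighbors neighbors (get_filtered_neighbors neighbors)

-- ===== LEMMAS AND PROOFS =====

-- the canonical value both programs compute: the neighbors whose label occurs exactly once
def pvKeep (xs : List (String × String)) : List (String × String) :=
  xs.filter (fun n => (xs.map Prod.snd).count n.2 == 1)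

def pvPick (g : List (String × String)) : Option (String × String) :=
  if g.length == 1 then some (g.getD 0 ("", "")) else none

def pvGItems (q : List (String × String)) : List (String × List (String × String)) :=
  (PySem.List.dedup (q.map Prod.snd)).map (fun l => (l, q.filter (fun n => n.2 == l)))

theorem pv_foldl_add_of_mem {α : Type} [BEq α] [LawfulBEq α] (a : α) :
    ∀ (l : List α) (s : PySem.Set α), a ∈ s →
      l.foldl PySem.Set.add s = (l.filter (fun b => !(b == a))).foldl PySem.Set.add s := by
  intro l
  induction l with
  | nil => intro s _; rfl
  | cons b t ih =>
      intro s hs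
      rw [List.foldl_cons, List.filter_cons]
      by_cases hb : (b == a) = true
      · have hba : b = a := by simpa using hb
        rw [hb]
        simp only [Bool.not_true, Bool.false_eq_true, if_false]
        rw [hba, PySem.Set.add_of_mem hs]
        exact ih s hs
      · have hb' : (!(b == a)) = true := by simpa using hb
        rw [hb']
        simp only [if_true, List.foldl_cons]
        exact ih _ ((PySem.Set.mem_add s b a).2 (Or.inl hs))

theorem pv_foldl_add_cons {α : Type} [BEq α] [LawfulBEq α] (a : α) :
    ∀ (l : List α) (s : List α), a ∉ l →
      l.foldl PySem.Set.add (a :: s) = a :: l.foldl PySem.Set.add s := by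
  intro l
  induction l with
  | nil => intro s _; rfl
  | cons b t ih =>
      intro s hal
      have hba : ¬ b = a := fun h => hal (by simp [h])
      have hstep : PySem.Set.add (a :: s) b = a :: PySem.Set.add s b := by
        simp only [PySem.Set.add, PySem.Set.contains, List.contains_cons]
        have : (b == a) = false := by simpa using hba
        rw [this]
        simp only [Bool.false_or]
        split <;> simp
      rw [List.foldl_cons, hstep, ih _ (fun h => hal (by simp [h])), List.foldl_cons]

theorem pv_dedup_cons {α : Type} [BEq α] [LawfulBEq α] (a : α) (l : List α) :
    PySem.List.dedup (a :: l) = a :: PySem.List.dedup (l.filter (fun b => !(b == a))) := by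
  rw [PySem.List.dedup_eq_ofList, PySem.List.dedup_eq_ofList,
      PySem.Set.ofList_eq_foldl, PySem.Set.ofList_eq_foldl, List.foldl_cons]
  have h0 : PySem.Set.add ([] : PySem.Set α) a = [a] := rfl
  rw [h0]
  rw [pv_foldl_add_of_mem a l [a] (by simp)]
  exact pv_foldl_add_cons a _ [] (by simp)

theorem pv_dedup_append {α : Type} [BEq α] [LawfulBEq α] (q : List α) (a : α) :
    PySem.List.dedup (q ++ [a])
      = if a ∈ q then PySem.List.dedup q else PySem.List.dedup q ++ [a] := by
  rw [PySem.List.dedup_eq_ofList, PySem.List.dedup_eq_ofList,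
      PySem.Set.ofList_eq_foldl, PySem.Set.ofList_eq_foldl, List.foldl_append,
      List.foldl_cons, List.foldl_nil]
  by_cases h : a ∈ q
  · rw [if_pos h]
    refine PySem.Set.add_of_mem ?_
    rw [← PySem.Set.ofList_eq_foldl]
    exact (PySem.Set.mem_ofList q a).2 h
  · rw [if_neg h]
    have hm : a ∉ List.foldl PySem.Set.add [] q := by
      rw [← PySem.Set.ofList_eq_foldl]
      exact fun hx => h ((PySem.Set.mem_ofList q a).1 hx)
    have hc : PySem.Set.contains (List.foldl PySem.Set.add [] q) a = false := by
      simp only [PySem.Set.contains]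
      simpa using hm
    simp only [PySem.Set.add, hc, Bool.false_eq_true, if_false]

theorem pv_find?_map {α β : Type} [BEq α] [LawfulBEq α] (F : α → β) (k : α) :
    ∀ L : List α,
      List.find? (fun p => p.1 == k) (L.map (fun l => (l, F l)))
        = if k ∈ L then some (k, F k) else none := by
  intro L
  induction L with
  | nil => simp
  | cons l t ih =>
      by_cases h : (l == k) = true
      · have : l = k := by simpa using h
        subst this
        simp [List.find?_cons, h]
      · have hne : ¬ k = l := fun he => h (by simp [he])
        simp [List.find?_cons, h, ih, hne]

-- `if p then add else skip` loop = fold of add over the filtered list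
theorem pv_foldl_add_if {α : Type} [BEq α] (p : α → Bool) :
    ∀ (xs : List α) (r : PySem.Set α),
      xs.foldl (fun r n => if p n then PySem.Set.add r n else r) r
        = (xs.filter p).foldl PySem.Set.add r := by
  intro xs
  induction xs with
  | nil => intro r; rfl
  | cons n t ih =>
      intro r
      by_cases h : p n = true
      · simp [h, ih]
      · simp [List.filter_cons, h, ih]

theorem pv_foldl_pick :
    ∀ (gs : List (List (String × String))) (r : PySem.Set (String × String)),
      gs.foldl (fun r g => if g.length == 1 then PySem.Set.add r (g.getD 0 ("", "")) else r) r
        = (gs.filterMap pvPick).foldl PySem.Set.add r := by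
  intro gs
  induction gs with
  | nil => intro r; rfl
  | cons g t ih =>
      intro r
      rw [List.foldl_cons, List.filterMap_cons]
      by_cases h : (g.length == 1) = true
      · simp only [pvPick, h, if_true, List.foldl_cons]
        exact ih _
      · simp only [pvPick, h, if_false, Bool.false_eq_true]
        exact ih _

theorem pv_loop1_mem :
    ∀ (xs : List (String × String)) (L D : PySem.Set String) (c : String → Nat),
      (∀ x, x ∈ L ↔ 1 ≤ c x) → (∀ x, x ∈ D ↔ 2 ≤ c x) →
      ∀ x, x ∈ (xs.foldl
          (fun (s : PySem.Set String × PySem.Set String) n =>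
            (PySem.Set.add s.1 n.2,
             if PySem.Set.contains s.1 n.2 then PySem.Set.add s.2 n.2 else s.2))
          (L, D)).2
        ↔ 2 ≤ c x + (xs.map Prod.snd).count x := by
  intro xs
  induction xs with
  | nil => intro L D c hL hD x; simpa using hD x
  | cons n t ih =>
      intro L D c hL hD x
      have hcont : PySem.Set.contains L n.2 = true ↔ n.2 ∈ L := by
        simp [PySem.Set.contains]
      have step : ((PySem.Set.add L n.2,
          if PySem.Set.contains L n.2 then PySem.Set.add D n.2 else D) :
          PySem.Set String × PySem.Set String) =
          (PySem.Set.add L n.2,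
          if PySem.Set.contains L n.2 then PySem.Set.add D n.2 else D) := rfl
      have := ih (PySem.Set.add L n.2)
          (if PySem.Set.contains L n.2 then PySem.Set.add D n.2 else D)
          (fun y => if y = n.2 then c y + 1 else c y)
          (by
            intro y
            rw [PySem.Set.mem_add]
            by_cases hy : y = n.2 <;> simp [hy, hL] <;> omega)
          (by
            intro y
            by_cases hc : PySem.Set.contains L n.2 = true
            · rw [if_pos hc, PySem.Set.mem_add]
              have h1 : 1 ≤ c n.2 := (hL n.2).1 (hcont.1 hc)
              by_cases hy : y = n.2 <;> simp [hy, hD] <;> omega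
            · rw [if_neg hc]
              have h0 : ¬ (1 ≤ c n.2) := fun h => hc (hcont.2 ((hL n.2).2 h))
              by_cases hy : y = n.2
              · subst hy
                simp [hD]; omega
              · simp [hy, hD])
          x
      rw [List.foldl_cons, this]
      by_cases hy : x = n.2
      · subst hy; simp [List.count_cons]; omega
      · simp [List.count_cons, hy, Ne.symm hy]

theorem pv_gstep (d : PySem.Dict String (List (String × String)))
    (p : List (String × String)) (n : String × String) (hit : d.items = pvGItems p) :
    (d.insert n.2 (d.getD n.2 [] ++ [n])).items = pvGItems (p ++ [n]) := by
  have hmem : ∀ l, l ∈ PySem.List.dedup (p.map Prod.snd) ↔ l ∈ p.map Prod.snd := by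
    intro l
    rw [PySem.List.dedup_eq_ofList]
    exact PySem.Set.mem_ofList _ _
  have hfind := pv_find?_map (fun l => p.filter (fun n => n.2 == l)) n.2
      (PySem.List.dedup (p.map Prod.snd))
  have hget? : d.get? n.2
      = if n.2 ∈ p.map Prod.snd then some (p.filter (fun m => m.2 == n.2)) else none := by
    rw [show d.get? n.2
        = Option.map (fun x => x.2) (List.find? (fun p => p.1 == n.2) d.items) from rfl, hit]
    unfold pvGItems
    rw [hfind]
    by_cases hv : n.2 ∈ p.map Prod.snd <;> simp [hmem, hv]
  have hcont : d.contains n.2 = decide (n.2 ∈ p.map Prod.snd) := by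
    rw [show d.contains n.2 = d.items.any (fun p => p.1 == n.2) from rfl, hit]
    unfold pvGItems
    by_cases hv : n.2 ∈ p.map Prod.snd
    · simp [List.any_map, Function.comp, hmem, hv]
      obtain ⟨m, hm, he⟩ := List.mem_map.1 hv
      exact ⟨m.1, by rw [← he]; simpa using hm⟩
    · simp [List.any_map, Function.comp, hmem, hv]
      intro x x1 hmem' he
      exact hv (he ▸ List.mem_map_of_mem hmem')
  -- new filter decomposition
  have hfilt : ∀ l, (p ++ [n]).filter (fun m => m.2 == l)
      = p.filter (fun m => m.2 == l) ++ (if n.2 = l then [n] else []) := by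
    intro l
    rw [List.filter_append]
    by_cases h : n.2 = l <;> simp [List.filter_cons, h]
  by_cases hv : n.2 ∈ p.map Prod.snd
  · -- key present: in-place replacement
    have hc : d.contains n.2 = true := by rw [hcont]; simpa using hv
    have hgd : d.getD n.2 [] = p.filter (fun m => m.2 == n.2) := by
      rw [PySem.Dict.getD, hget?, if_pos hv]; rfl
    rw [PySem.Dict.insert, if_pos hc]
    simp only []
    rw [hit]
    unfold pvGItems
    rw [List.map_map]
    have hded : PySem.List.dedup ((p ++ [n]).map Prod.snd) = PySem.List.dedup (p.map Prod.snd) := by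
      rw [List.map_append]
      simp only [List.map_cons, List.map_nil]
      rw [pv_dedup_append, if_pos hv]
    rw [hded]
    refine List.map_congr_left ?_
    intro l _
    by_cases h : l = n.2
    · subst h
      simp only [Function.comp_apply, beq_self_eq_true, if_true, hgd, hfilt]
    · have hbe : (l == n.2) = false := by simpa using h
      simp only [Function.comp_apply, hbe, Bool.false_eq_true, if_false, hfilt]
      rw [if_neg (fun he => h he.symm)]
      simp

  · -- new key: appended
    have hc : d.contains n.2 = false := by rw [hcont]; simpa using hv
    have hgd : d.getD n.2 [] = [] := by
      rw [PySem.Dict.getD, hget?, if_neg hv]; rfl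
    rw [PySem.Dict.insert, hc]
    simp only [Bool.false_eq_true, if_false]
    rw [hit]
    unfold pvGItems
    have hded : PySem.List.dedup ((p ++ [n]).map Prod.snd)
        = PySem.List.dedup (p.map Prod.snd) ++ [n.2] := by
      rw [List.map_append]
      simp only [List.map_cons, List.map_nil]
      rw [pv_dedup_append, if_neg hv]
    rw [hded, List.map_append]
    congr 1
    · refine List.map_congr_left ?_
      intro l hl
      have hlp : l ∈ p.map Prod.snd := (hmem l).1 hl
      have h : ¬ n.2 = l := fun he => hv (he ▸ hlp)
      rw [hfilt, if_neg h]
      simp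
    · simp only [List.map_cons, List.map_nil]
      rw [hgd, hfilt, if_pos rfl]
      have : p.filter (fun m => m.2 == n.2) = [] := by
        rw [List.filter_eq_nil_iff]
        intro m hm hb
        exact hv (by
          have : m.2 = n.2 := by simpa using hb
          exact this ▸ List.mem_map_of_mem hm)
      rw [this]

theorem pv_gloop :
    ∀ (t : List (String × String)) (d : PySem.Dict String (List (String × String)))
      (p : List (String × String)), d.items = pvGItems p →
      (t.foldl (fun d n => d.insert n.2 (d.getD n.2 [] ++ [n])) d).items = pvGItems (p ++ t) := by
  intro t
  induction t with
  | nil => intro d p h; simpa using h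
  | cons n t ih =>
      intro d p h
      rw [List.foldl_cons]
      have := ih _ (p ++ [n]) (pv_gstep d p n h)
      simpa [List.append_assoc] using this

theorem pv_main_aux :
    ∀ (N : Nat) (xs : List (String × String)), xs.length ≤ N →
      (PySem.List.dedup (xs.map Prod.snd)).filterMap
          (fun l => pvPick (xs.filter (fun n => n.2 == l)))
        = xs.filter (fun n => (xs.map Prod.snd).count n.2 == 1) := by
  intro N
  induction N with
  | zero =>
      intro xs hlen
      have : xs = [] := List.length_eq_zero_iff.1 (Nat.le_zero.1 hlen)
      subst this; rfl
  | succ N ih =>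
      intro xs hlen
      match xs with
      | [] => rfl
      | n :: t =>
        have hmapcons : (n :: t).map Prod.snd = n.2 :: t.map Prod.snd := rfl
        -- t' : t with all n.2-labelled entries removed
        have hlt : (t.filter (fun m => !(m.2 == n.2))).length ≤ N :=
          le_trans (List.length_filter_le _ _) (Nat.succ_le_succ_iff.1 (by simpa using hlen))
        have IH := ih (t.filter (fun m => !(m.2 == n.2))) hlt
        -- label lists
        have hmapfilt : (t.map Prod.snd).filter (fun b => !(b == n.2))
            = (t.filter (fun m => !(m.2 == n.2))).map Prod.snd := by
          rw [List.filter_map]; rfl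
        have hded : PySem.List.dedup ((n :: t).map Prod.snd)
            = n.2 :: PySem.List.dedup ((t.filter (fun m => !(m.2 == n.2))).map Prod.snd) := by
          rw [hmapcons, pv_dedup_cons, hmapfilt]
        -- head group
        have hheadg : (n :: t).filter (fun m => m.2 == n.2)
            = n :: t.filter (fun m => m.2 == n.2) := by
          rw [List.filter_cons]; simp
        -- members of the deduped tail are ≠ n.2
        have htailne : ∀ l ∈ PySem.List.dedup ((t.filter (fun m => !(m.2 == n.2))).map Prod.snd),
            ¬ l = n.2 := by
          intro l hl hla
          rw [PySem.List.dedup_eq_ofList, PySem.Set.mem_ofList] at hl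
          obtain ⟨m, hm, he⟩ := List.mem_map.1 hl
          have := (List.mem_filter.1 hm).2
          rw [he, hla] at this
          simp at this
        -- groups of tail labels agree between (n :: t) and t'
        have hgroups : ∀ l, ¬ l = n.2 →
            (n :: t).filter (fun m => m.2 == l)
              = (t.filter (fun m => !(m.2 == n.2))).filter (fun m => m.2 == l) := by
          intro l hl
          rw [List.filter_cons]
          have : ((n.2 : String) == l) = false := by simpa using fun h => hl h.symm
          rw [if_neg (by simp [this])]
          rw [List.filter_filter]
          refine (List.filter_congr (fun m hm => ?_)).symm
          by_cases h2 : (m.2 == l) = true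
          · have hml : m.2 = l := by simpa using h2
            have : (m.2 == n.2) = false := by
              simp only [beq_eq_false_iff_ne, ne_eq, hml]
              exact fun hh => hl hh
            simp [h2, this]
          · simp [h2]
        -- tail filterMap agrees with the IH
        have htail : (PySem.List.dedup ((t.filter (fun m => !(m.2 == n.2))).map Prod.snd)).filterMap
              (fun l => pvPick ((n :: t).filter (fun m => m.2 == l)))
            = (t.filter (fun m => !(m.2 == n.2))).filter
                (fun m => (((t.filter (fun m => !(m.2 == n.2))).map Prod.snd).count m.2 == 1)) := by
          rw [List.filterMap_congr (fun l hl => by rw [hgroups l (htailne l hl)])]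
          exact IH
        -- RHS tail agrees with the filtered tail
        have hrtail : t.filter (fun m => (((n :: t).map Prod.snd).count m.2 == 1))
            = (t.filter (fun m => !(m.2 == n.2))).filter
                (fun m => (((t.filter (fun m => !(m.2 == n.2))).map Prod.snd).count m.2 == 1)) := by
          rw [List.filter_filter]
          refine List.filter_congr (fun m hm => ?_)
          by_cases hma : (m.2 == n.2) = true
          · have hme : m.2 = n.2 := by simpa using hma
            have h1 : 0 < (t.map Prod.snd).count n.2 :=
              List.count_pos_iff.2 (hme ▸ List.mem_map_of_mem hm)
            have hL : (((n :: t).map Prod.snd).count m.2 == 1) = false := by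
              rw [hmapcons, hme, List.count_cons]
              simp only [beq_self_eq_true, if_true, beq_eq_false_iff_ne, ne_eq]
              omega
            rw [hL, hma]
            simp
          · have hma' : (m.2 == n.2) = false := by simpa using hma
            have hL : ((n :: t).map Prod.snd).count m.2 = (t.map Prod.snd).count m.2 := by
              rw [hmapcons, List.count_cons]
              have : ((n.2 : String) == m.2) = false := by
                simp only [beq_eq_false_iff_ne, ne_eq]
                intro hh
                rw [beq_eq_false_iff_ne] at hma'
                exact hma' hh.symm
              rw [this]
              simp
            have hR : ((t.filter (fun m => !(m.2 == n.2))).map Prod.snd).count m.2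
                = (t.map Prod.snd).count m.2 := by
              rw [← hmapfilt]
              exact List.count_filter (by simp [hma'])
            rw [hL, hR, hma']
            simp
        -- assemble
        rw [hded, List.filter_cons]
        have hccons : (((n :: t).map Prod.snd).count n.2) = (t.map Prod.snd).count n.2 + 1 := by
          rw [hmapcons, List.count_cons]
          simp
        by_cases hdup : n.2 ∈ t.map Prod.snd
        · -- duplicated head label: dropped on both sides
          have hc1 : 0 < (t.map Prod.snd).count n.2 := List.count_pos_iff.2 hdup
          have hlen0 : (t.filter (fun m => m.2 == n.2)).length ≠ 0 := by
            rw [Ne, List.length_eq_zero_iff, List.filter_eq_nil_iff]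
            push_neg
            obtain ⟨m, hm, he⟩ := List.mem_map.1 hdup
            exact ⟨m, hm, by simpa using he⟩
          have hF : (fun l => pvPick ((n :: t).filter (fun m => m.2 == l))) n.2 = none := by
            simp only [hheadg]
            unfold pvPick
            rw [if_neg]
            simp only [List.length_cons, beq_iff_eq]
            omega
          rw [List.filterMap_cons_none (f := fun l => pvPick ((n :: t).filter (fun m => m.2 == l))) hF, htail, hrtail]
          rw [if_neg (by rw [hccons]; simp only [beq_iff_eq]; omega)]
        · -- unique head label: kept on both sides
          have hc0 : (t.map Prod.snd).count n.2 = 0 := List.count_eq_zero.2 hdup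
          have hnil : t.filter (fun m => m.2 == n.2) = [] := by
            rw [List.filter_eq_nil_iff]
            intro m hm hb
            exact hdup (by
              have : m.2 = n.2 := by simpa using hb
              exact this ▸ List.mem_map_of_mem hm)
          have hF : (fun l => pvPick ((n :: t).filter (fun m => m.2 == l))) n.2 = some n := by
            simp only [hheadg, hnil]
            unfold pvPick
            rfl
          rw [List.filterMap_cons_some (f := fun l => pvPick ((n :: t).filter (fun m => m.2 == l))) hF, htail, hrtail]
          rw [if_pos (by rw [hccons, hc0]; simp)]

theorem pv_A_eq (xs : List (String × String)) :
    get_filtered_neighbors xs = PySem.Set.ofList (pvKeep xs) := by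
  unfold get_filtered_neighbors
  have hD := pv_loop1_mem xs PySem.Set.empty PySem.Set.empty (fun _ => 0)
      (by intro x; simp [PySem.Set.empty]) (by intro x; simp [PySem.Set.empty])
  rw [pv_foldl_add_if]
  rw [PySem.Set.ofList_eq_foldl]
  congr 1
  unfold pvKeep
  refine List.filter_congr (fun n hn => ?_)
  have hmem : n.2 ∈ xs.map Prod.snd := List.mem_map_of_mem hn
  have h1 : 0 < (xs.map Prod.snd).count n.2 := List.count_pos_iff.2 hmem
  have hd := hD n.2
  by_cases h2 : (xs.map Prod.snd).count n.2 = 1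
  · have hnot : ¬ (n.2 ∈ (xs.foldl
        (fun (s : PySem.Set String × PySem.Set String) n =>
          (PySem.Set.add s.1 n.2,
           if PySem.Set.contains s.1 n.2 then PySem.Set.add s.2 n.2 else s.2))
        (PySem.Set.empty, PySem.Set.empty)).2) := by
      rw [hd]; simp only []; omega
    have : PySem.Set.contains (xs.foldl
        (fun (s : PySem.Set String × PySem.Set String) n =>
          (PySem.Set.add s.1 n.2,
           if PySem.Set.contains s.1 n.2 then PySem.Set.add s.2 n.2 else s.2))
        (PySem.Set.empty, PySem.Set.empty)).2 n.2 = false := by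
      simp only [PySem.Set.contains]
      simpa using hnot
    rw [this]
    simp [h2]
  · have hin : n.2 ∈ (xs.foldl
        (fun (s : PySem.Set String × PySem.Set String) n =>
          (PySem.Set.add s.1 n.2,
           if PySem.Set.contains s.1 n.2 then PySem.Set.add s.2 n.2 else s.2))
        (PySem.Set.empty, PySem.Set.empty)).2 := by
      rw [hd]; simp only []; omega
    have : PySem.Set.contains (xs.foldl
        (fun (s : PySem.Set String × PySem.Set String) n =>
          (PySem.Set.add s.1 n.2,
           if PySem.Set.contains s.1 n.2 then PySem.Set.add s.2 n.2 else s.2))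
        (PySem.Set.empty, PySem.Set.empty)).2 n.2 = true := by
      simp only [PySem.Set.contains]
      simpa using hin
    rw [this]
    simp [h2]

theorem pv_B_eq (xs : List (String × String)) :
    get_filtered_neighbors_alt xs = PySem.Set.ofList (pvKeep xs) := by
  unfold get_filtered_neighbors_alt
  have hitems : (xs.foldl (fun d n => d.insert n.2 (d.getD n.2 [] ++ [n]))
      PySem.Dict.empty).items = pvGItems xs := by
    have := pv_gloop xs PySem.Dict.empty [] rfl
    simpa using this
  rw [pv_foldl_pick]
  have hvals : (xs.foldl (fun d n => d.insert n.2 (d.getD n.2 [] ++ [n]))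
      PySem.Dict.empty).values
      = (PySem.List.dedup (xs.map Prod.snd)).map (fun l => xs.filter (fun n => n.2 == l)) := by
    rw [show ∀ d : PySem.Dict String (List (String × String)),
        d.values = d.items.map (fun x => x.2) from fun _ => rfl]
    rw [hitems]
    unfold pvGItems
    rw [List.map_map]
    rfl
  rw [hvals, List.filterMap_map]
  rw [show ((pvPick ∘ fun l => xs.filter (fun n => n.2 == l)))
      = (fun l => pvPick (xs.filter (fun n => n.2 == l))) from rfl]
  rw [pv_main_aux xs.length xs (Nat.le_refl _)]
  rw [PySem.Set.ofList_eq_foldl]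
  rfl

-- ===== VERDICT (by name: the statement is the Claim_ definition above) =====
theorem get_filtered_neighbors_spec : Claim_equal_get_filtered_neighbors := by
  intro neighbors _
  unfold Spec_get_filtered_neighbors
  rw [pv_A_eq, pv_B_eq]
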